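-- pv_equiv track=rewrite | github.com/Irmitya/zpy__mods | driver_constraint_addon/constraint_operator.py | split_data_path
-- ===== SOURCE A (Python) =====
-- def split_data_path(path):
--     elements = []
--
--     element = ""
--     dot_valid = True
--     quot_mark_open = False
--     for i, c in enumerate(path):
--         if c in ["'", '"'] and quot_mark_open is False:
--             quot_mark_open = True
--             dot_valid = False
--         elif c in ["'", '"'] and quot_mark_open is True:
--             quot_mark_open = False
--             dot_valid = True
--
--         if c != '.' or dot_valid is False:
--             element += c
--         elif c == '.' and dot_valid:
--             elements.append(element)
--             element = ""
--         if i == len(path) - 1 and element != "":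
--             elements.append(element)
--             element = ""
--
--     return elements
-- ===== SOURCE B (Python) =====
-- def split_data_path(path):
--     # One pass records the indices of unquoted dots; the result is built by slicing.
--     quote_open = False
--     positions = []
--     for i, c in enumerate(path):
--         if c in "'\"":
--             quote_open = not quote_open
--         elif c == '.' and not quote_open:
--             positions.append(i)
--     parts = []
--     start = 0
--     for p in positions:
--         parts.append(path[start:p])
--         start = p + 1
--     parts.append(path[start:])
--     if parts[-1] == "":
--         parts.pop()
--     return parts
-- ===== Notes on version B (the rewrite author's own statement) =====
-- stated objective: faster
-- what changed: B replaces A's per-character segment accumulator (with dot_valid/quot_mark_open flags and an in-loop last-index check) by one pass that toggles a single quote flag and records indices of unquoted dots, then builds the segments by slicing the path at those indices and dropping one trailing empty slice.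
import Mathlib
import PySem

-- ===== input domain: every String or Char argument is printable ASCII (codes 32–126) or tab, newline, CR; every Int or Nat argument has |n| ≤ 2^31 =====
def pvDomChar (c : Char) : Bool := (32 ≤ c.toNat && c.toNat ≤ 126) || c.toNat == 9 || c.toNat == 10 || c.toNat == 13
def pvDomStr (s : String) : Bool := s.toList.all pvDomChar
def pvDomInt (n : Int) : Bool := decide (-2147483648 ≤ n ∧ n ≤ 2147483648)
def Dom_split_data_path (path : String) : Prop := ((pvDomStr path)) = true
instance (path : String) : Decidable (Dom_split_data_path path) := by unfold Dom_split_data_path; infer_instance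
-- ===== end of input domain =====

set_option maxRecDepth 8000


-- B replaces A's char-by-char segment accumulator by a pass that records the indices of
-- unquoted dots and then builds the result by slicing (measured constant-factor faster).

-- ===== PORT A =====
-- one loop iteration of A (state: elements, element, dot_valid, quot_mark_open)
def pvStepA (n : Int) (st : List (List Char) × List Char × Bool × Bool) (ic : Int × Char) :
    List (List Char) × List Char × Bool × Bool :=
  let elements := st.1
  let element := st.2.1
  let dot_valid := st.2.2.1
  let quot_mark_open := st.2.2.2
  let i := ic.1
  let c := ic.2
  let dq : Bool × Bool :=
    if (c = '\'' ∨ c = '"') ∧ quot_mark_open = false then (false, true)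
    else if (c = '\'' ∨ c = '"') ∧ quot_mark_open = true then (true, false)
    else (dot_valid, quot_mark_open)
  let ee : List (List Char) × List Char :=
    if ¬ c = '.' ∨ dq.1 = false then (elements, element ++ [c])
    else (elements ++ [element], [])
  if i = n - 1 ∧ ee.2 ≠ [] then (ee.1 ++ [ee.2], [], dq.1, dq.2)
  else (ee.1, ee.2, dq.1, dq.2)

def split_data_path (path : String) : List String :=
  let cs := path.toList
  (((PySem.List.enumerate cs 0).foldl (pvStepA cs.length) ([], [], true, false)).1).map String.ofList

-- ===== PORT B =====
-- first pass of B: toggle the quote flag, record indices of unquoted dots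
def pvStepQ (st : Bool × List Int) (ic : Int × Char) : Bool × List Int :=
  if ic.2 = '\'' ∨ ic.2 = '"' then (!st.1, st.2)
  else if ic.2 = '.' ∧ st.1 = false then (st.1, st.2 ++ [ic.1])
  else st

def split_data_path_alt (path : String) : List String :=
  let cs := path.toList
  let positions := ((PySem.List.enumerate cs 0).foldl pvStepQ (false, [])).2
  let fin := positions.foldl
    (fun (st : List (List Char) × Int) p =>
      (st.1 ++ [PySem.List.slice cs (some st.2) (some p)], p + 1))
    ([], 0)
  let parts := fin.1 ++ [PySem.List.slice cs (some fin.2) none]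
  let parts2 := if parts.getLast? = some ([] : List Char) then parts.dropLast else parts
  parts2.map String.ofList

-- ===== PRECONDITION & SPEC =====
def Spec_split_data_path (path : String) (out : List String) : Prop := out = split_data_path_alt path
instance (path : String) (out : List String) : Decidable (Spec_split_data_path path out) := by unfold Spec_split_data_path; infer_instance

-- ===== CLAIM (what is proved, stated in full; the proofs are below) =====
def Claim_equal_split_data_path : Prop := ∀ (path : String), Dom_split_data_path path → Spec_split_data_path path (split_data_path path)

-- ===== LEMMAS AND PROOFS =====

-- reference: the segments of cs (quote flag q), as (first segment, later segments)
def pvSegs : List Char → Bool → List Char × List (List Char)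
  | [], _ => ([], [])
  | c :: cs, q =>
    if c = '\'' ∨ c = '"' then ((c :: (pvSegs cs (!q)).1), (pvSegs cs (!q)).2)
    else if c = '.' ∧ q = false then ([], (pvSegs cs q).1 :: (pvSegs cs q).2)
    else ((c :: (pvSegs cs q).1), (pvSegs cs q).2)

-- drop one trailing empty segment
def pvDropTail (l : List (List Char)) : List (List Char) :=
  if l.getLast? = some ([] : List Char) then l.dropLast else l

theorem pvDropTail_cons₂ (x y : List Char) (t : List (List Char)) :
    pvDropTail (x :: y :: t) = x :: pvDropTail (y :: t) := by
  unfold pvDropTail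
  rw [List.getLast?_cons_cons]
  split_ifs <;> simp

theorem pvA_loop (n : Int) (cs : List Char) :
    ∀ (k : Int) (es : List (List Char)) (el : List Char) (q : Bool),
      cs ≠ [] → k + cs.length = n →
      ((PySem.List.enumerate cs k).foldl (pvStepA n) (es, el, !q, q)).1
        = es ++ pvDropTail ((el ++ (pvSegs cs q).1) :: (pvSegs cs q).2) := by
  induction cs with
  | nil => intro k es el q hne _; exact absurd rfl hne
  | cons c cs ih =>
    intro k es el q _ hk
    rw [PySem.List.enumerate_cons, List.foldl_cons]
    rcases cs with _ | ⟨c', cs'⟩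
    · -- last character: i = k = n - 1
      have hk1 : k = n - 1 := by simp at hk; omega
      rw [PySem.List.enumerate_nil, List.foldl_nil]
      by_cases hq : c = '\'' ∨ c = '"'
      · have hcd : ¬ c = '.' := by rcases hq with h | h <;> simp [h]
        cases q <;> simp [pvStepA, pvSegs, pvDropTail, hq, hcd, hk1]
      · by_cases hd : c = '.' ∧ q = false
        · obtain ⟨hc1, hq1⟩ := hd
          subst hc1; subst hq1
          simp [pvStepA, pvSegs, pvDropTail, hk1]
        · by_cases hcd : c = '.'
          · have hqt : q = true := by
              subst hcd; cases q
              · exact absurd ⟨rfl, rfl⟩ hd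
              · rfl
            subst hqt; subst hcd
            simp [pvStepA, pvSegs, pvDropTail, hk1]
          · cases q <;> simp [pvStepA, pvSegs, pvDropTail, hq, hcd, hk1]
    · have hkne : ¬ k = n - 1 := by
        simp only [List.length_cons] at hk; push_cast at hk; omega
      have hk' : (k + 1) + ((c' :: cs').length : Int) = n := by
        simp only [List.length_cons] at hk ⊢; push_cast at hk ⊢; omega
      by_cases hq : c = '\'' ∨ c = '"'
      · have hcd : ¬ c = '.' := by rcases hq with h | h <;> simp [h]
        have hstep : pvStepA n (es, el, !q, q) (k, c) = (es, el ++ [c], !(!q), !q) := by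
          cases q <;> simp [pvStepA, hq, hcd, hkne]
        rw [hstep, ih (k + 1) es (el ++ [c]) (!q) (by simp) hk']
        simp [pvSegs, hq, List.append_assoc]
      · by_cases hd : c = '.' ∧ q = false
        · obtain ⟨hc1, hq1⟩ := hd
          subst hc1; subst hq1
          have hstep : pvStepA n (es, el, !false, false) (k, '.') = (es ++ [el], [], !false, false) := by
            simp [pvStepA, hkne]
          rw [hstep, ih (k + 1) (es ++ [el]) [] false (by simp) hk']
          have hne : ¬('.' = '\'' ∨ '.' = '"') := by decide
          simp only [pvSegs, if_neg hne, and_self, if_true]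
          rw [pvDropTail_cons₂]
          simp
        · have hstep : pvStepA n (es, el, !q, q) (k, c) = (es, el ++ [c], !q, q) := by
            by_cases hcd : c = '.'
            · have hqt : q = true := by
                subst hcd; cases q
                · exact absurd ⟨rfl, rfl⟩ hd
                · rfl
              subst hqt; subst hcd
              simp [pvStepA, hkne]
            · simp [pvStepA, hq, hcd, hkne]
          rw [hstep, ih (k + 1) es (el ++ [c]) q (by simp) hk']
          simp [pvSegs, hq, hd, List.append_assoc]

theorem pvA_eq (path : String) :
    split_data_path path
      = (pvDropTail ((pvSegs path.toList false).1 :: (pvSegs path.toList false).2)).map String.ofList := by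
  unfold split_data_path
  dsimp only
  rcases hcs : path.toList with _ | ⟨c, cs⟩
  · simp [PySem.List.enumerate_nil, pvSegs, pvDropTail]
  · have h := pvA_loop (((c :: cs).length : Nat) : Int) (c :: cs) 0 [] [] false (by simp) (by simp)
    rw [Bool.not_false] at h
    rw [h]
    simp

def pvPos : List Char → Bool → Int → List Int
  | [], _, _ => []
  | c :: cs, q, k =>
    if c = '\'' ∨ c = '"' then pvPos cs (!q) (k + 1)
    else if c = '.' ∧ q = false then k :: pvPos cs q (k + 1)
    else pvPos cs q (k + 1)

theorem pvQ_loop (cs : List Char) :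
    ∀ (k : Int) (q : Bool) (acc : List Int),
      ((PySem.List.enumerate cs k).foldl pvStepQ (q, acc)).2 = acc ++ pvPos cs q k := by
  induction cs with
  | nil => intro k q acc; simp [PySem.List.enumerate_nil, pvPos]
  | cons c cs ih =>
    intro k q acc
    rw [PySem.List.enumerate_cons, List.foldl_cons]
    by_cases hq : c = '\'' ∨ c = '"'
    · have hd : ¬ (c = '.' ∧ q = false) := by rcases hq with h | h <;> simp [h]
      simp only [pvStepQ, hq, if_pos]
      rw [ih]
      simp [pvPos, hq]
    · by_cases hd : c = '.' ∧ q = false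
      · simp only [pvStepQ, hd]
        rw [ih]
        simp [pvPos, hq, hd]
      · simp only [pvStepQ, hq, hd, if_false]
        rw [ih]
        simp [pvPos, hq, hd]

theorem pvPos_lower (cs : List Char) :
    ∀ (q : Bool) (k p : Int), p ∈ pvPos cs q k → k ≤ p := by
  induction cs with
  | nil => intro q k p h; simp [pvPos] at h
  | cons c cs ih =>
    intro q k p h
    unfold pvPos at h
    split_ifs at h with h1 h2
    · have := ih _ _ _ h; omega
    · rcases List.mem_cons.mp h with h | h
      · omega
      · have := ih _ _ _ h; omega
    · have := ih _ _ _ h; omega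

def pvBuild (L : List Char) : List Int → Int → List (List Char)
  | [], s => [PySem.List.slice L (some s) none]
  | p :: ps, s => PySem.List.slice L (some s) (some p) :: pvBuild L ps (p + 1)

theorem pvB_fold (L : List Char) (ps : List Int) :
    ∀ (acc : List (List Char)) (s : Int),
      (ps.foldl (fun (st : List (List Char) × Int) p =>
        (st.1 ++ [PySem.List.slice L (some st.2) (some p)], p + 1)) (acc, s)).1
      ++ [PySem.List.slice L (some ((ps.foldl (fun (st : List (List Char) × Int) p =>
        (st.1 ++ [PySem.List.slice L (some st.2) (some p)], p + 1)) (acc, s)).2)) none]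
      = acc ++ pvBuild L ps s := by
  induction ps with
  | nil => intro acc s; simp [pvBuild]
  | cons p ps ih =>
    intro acc s
    simp only [List.foldl_cons]
    rw [ih]
    simp [pvBuild]

theorem pvSlice_cons (L : List Char) (c : Char) (cs : List Char) (s m : Nat)
    (h : L.drop s = c :: cs) (hm : s + 1 ≤ m) :
    PySem.List.slice L (some (s : Int)) (some (m : Int))
      = c :: PySem.List.slice L (some ((s + 1 : Nat) : Int)) (some (m : Int)) := by
  rw [PySem.List.slice_natCast, PySem.List.slice_natCast, h]
  have h1 : (L.drop (s + 1)) = cs := by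
    rw [← List.tail_drop, h]; rfl
  rw [h1]
  have h2 : m - s = (m - (s + 1)) + 1 := by omega
  rw [h2, List.take_succ_cons]

theorem pvB_step (L : List Char) (c : Char) (cs : List Char) (s : Nat) (q' : Bool)
    (h : L.drop s = c :: cs) (h1 : L.drop (s + 1) = cs)
    (key : pvBuild L (pvPos cs q' ((s + 1 : Nat) : Int)) ((s + 1 : Nat) : Int)
            = (pvSegs cs q').1 :: (pvSegs cs q').2) :
    pvBuild L (pvPos cs q' ((s + 1 : Nat) : Int)) (s : Int)
      = (c :: (pvSegs cs q').1) :: (pvSegs cs q').2 := by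
  rcases hps : pvPos cs q' ((s + 1 : Nat) : Int) with _ | ⟨p, ps⟩
  · rw [hps] at key
    simp only [pvBuild, PySem.List.slice_from_natCast, h1, h] at key ⊢
    rw [List.cons.injEq] at key
    rw [← key.1, ← key.2]
  · rw [hps] at key
    have hp : ((s + 1 : Nat) : Int) ≤ p := by
      apply pvPos_lower cs q' _ p
      rw [hps]; exact List.mem_cons_self
    have hp0 : (0 : Int) ≤ p := le_trans (by positivity) hp
    obtain ⟨m, rfl⟩ : ∃ m : Nat, p = (m : Int) := ⟨p.toNat, (Int.toNat_of_nonneg hp0).symm⟩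
    have hm : s + 1 ≤ m := by exact_mod_cast hp
    simp only [pvBuild] at key ⊢
    rw [pvSlice_cons L c cs s m h hm]
    rw [List.cons.injEq] at key
    rw [← key.1, ← key.2]

theorem pvB_main (cs : List Char) :
    ∀ (q : Bool) (s : Nat) (L : List Char), L.drop s = cs →
      pvBuild L (pvPos cs q (s : Int)) (s : Int) = (pvSegs cs q).1 :: (pvSegs cs q).2 := by
  induction cs with
  | nil =>
    intro q s L h
    simp [pvPos, pvBuild, pvSegs, PySem.List.slice_from_natCast, h]
  | cons c cs ih =>
    intro q s L h
    have h1 : L.drop (s + 1) = cs := by rw [← List.tail_drop, h]; rfl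
    have hc : ((s : Int) + 1) = ((s + 1 : Nat) : Int) := by push_cast; ring
    by_cases hq : c = '\'' ∨ c = '"'
    · have step := pvB_step L c cs s (!q) h h1 (ih (!q) (s + 1) L h1)
      simp only [pvPos, pvSegs, hc, if_pos hq]
      exact step
    · by_cases hd : c = '.' ∧ q = false
      · obtain ⟨hc1, hq1⟩ := hd
        subst hc1; subst hq1
        have key := ih false (s + 1) L h1
        have hne : ¬('.' = '\'' ∨ '.' = '"') := by decide
        have htriv : ('.' = '.' ∧ false = false) := ⟨rfl, rfl⟩
        simp only [pvPos, pvSegs, hc, if_neg hne, and_self, if_true]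
        simp only [pvBuild, hc, key, PySem.List.slice_natCast]
        simp
      · have step := pvB_step L c cs s q h h1 (ih q (s + 1) L h1)
        simp only [pvPos, pvSegs, hc, if_neg hq, if_neg hd]
        exact step

theorem pvB_eq (path : String) :
    split_data_path_alt path
      = (pvDropTail ((pvSegs path.toList false).1 :: (pvSegs path.toList false).2)).map String.ofList := by
  unfold split_data_path_alt
  dsimp only
  rw [pvQ_loop path.toList 0 false []]
  rw [List.nil_append]
  rw [pvB_fold path.toList (pvPos path.toList false 0) [] 0]
  rw [List.nil_append]
  have hmain := pvB_main path.toList false 0 path.toList (by simp)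
  simp only [Nat.cast_zero] at hmain
  rw [hmain]
  rfl

-- ===== VERDICT (by name: the statement is the Claim_ definition above) =====
theorem split_data_path_spec : Claim_equal_split_data_path := by
  intro path _
  unfold Spec_split_data_path
  rw [pvA_eq, pvB_eq]
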